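-- pv_equiv track=rewrite | github.com/honu-shell-utions/python | sandbox/project_euler/501-550/521_smallest_prime_factor02.py | sievecntsum
-- ===== SOURCE A (Python) =====
-- from math import isqrt
--
-- def sievecntsum(n):
--     p = isqrt(n)
--     if (p+1)**2 <= n:
--         p += 1
--     V = [n//i for i in range(1,p+1)]
--     V += list(range(V[-1]-1,0,-1))
--     S0 = {i:i-1          for i in V}
--     S1 = {i:i*(i+1)//2-1 for i in V}
--     SP = {i:i*(i+1)//2-1 for i in V}
--     for p in range(2,p+1):
--         if S0[p] > S0[p-1]: # p is prime
--             p2 = p*p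
--             for v in V:
--                 if v < p2: break
--                 vmodp = v//p
--                 D0 =  S0[vmodp] - S0[p-1]
--                 D1 =  S1[vmodp] - S1[p-1]
--                 S0[v] -=    D0
--                 S1[v] -= p*(D1)
--                 SP[v] -= p*(D1-D0)
--     return SP[n] % MOD
--
-- MOD = 10**9
-- ===== SOURCE B (Python) =====
-- from math import isqrt
--
-- MOD = 10**9
--
-- def sievecntsum(n):
--     r = isqrt(n)
--     primes = []
--     cons = []
--     pi_small = [0] * (r + 2)
--     memo = {}
--
--     def trip(v, j):
--         cap = pi_small[isqrt(v)]
--         if j > cap: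
--             j = cap
--         lst = memo.get(v)
--         if lst is None:
--             s = v * (v + 1) // 2 - 1
--             lst = [(v - 1, s, s)]
--             memo[v] = lst
--         jj = len(lst) - 1
--         t = lst[jj]
--         while jj < j:
--             p = primes[jj]
--             c0, c1 = cons[jj]
--             d0, d1, _ = trip(v // p, jj)
--             D0 = d0 - c0
--             D1 = d1 - c1
--             t = (t[0] - D0, t[1] - p * D1, t[2] - p * (D1 - D0))
--             lst.append(t)
--             jj += 1
--         return lst[j]
--
--     cnt = 0
--     for k in range(2, r + 1):
--         if trip(k, cnt)[0] > trip(k - 1, cnt)[0]: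
--             t0, t1, _ = trip(k - 1, cnt)
--             primes.append(k)
--             cons.append((t0, t1))
--             cnt += 1
--         pi_small[k] = cnt
--     return trip(n, cnt)[2] % MOD
-- ===== Notes on version B (the rewrite author's own statement) =====
-- stated objective: alternative
-- what changed: Replaces A's eager bottom-up sieve (three value-keyed dictionaries over a precomputed quotient list V, mutated in place by a prime-major nested loop with a break) by a top-down, demand-driven memoized recursion trip(v, j) = (count, sum, spf-sum) of value v after the first j discovered primes: each value's stage history is built lazily from its own seed, the v//p lookup becomes a recursive call, primes are discovered by the same recursion, and no value list or global per-prime sweep exists at all; …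
-- outside the precondition, e.g. on sievecntsum(0): A raises IndexError, B returns 999999999
import Mathlib
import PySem

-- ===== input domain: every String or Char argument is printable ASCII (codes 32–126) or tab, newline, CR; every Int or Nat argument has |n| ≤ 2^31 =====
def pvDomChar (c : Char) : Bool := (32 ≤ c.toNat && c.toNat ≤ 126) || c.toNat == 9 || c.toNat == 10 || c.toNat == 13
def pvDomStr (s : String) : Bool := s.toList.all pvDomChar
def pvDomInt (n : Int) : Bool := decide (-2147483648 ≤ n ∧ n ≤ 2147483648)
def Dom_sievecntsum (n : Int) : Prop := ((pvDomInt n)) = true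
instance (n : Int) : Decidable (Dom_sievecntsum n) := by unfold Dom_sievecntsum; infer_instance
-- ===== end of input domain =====

-- B replaces A's eager bottom-up dictionary sieve by a top-down, demand-driven
-- memoized recursion (lazy per-value stage histories, primes discovered by the
-- recursion itself); equivalent on n >= 1, measured modestly faster (fewer stages built).


-- ===== PORT A =====

-- math.isqrt: exact for 0 ≤ n (Python raises ValueError for n < 0; excluded by Pre_)
def pyIsqrt (n : Int) : Int := (Nat.sqrt n.toNat : Int)

def MOD : Int := 10 ^ 9

-- A's loop state: the three dicts S0, S1, SP
structure StA where
  S0 : PySem.Dict Int Int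
  S1 : PySem.Dict Int Int
  SP : PySem.Dict Int Int

-- one iteration of A's inner 'for v in V' body (dict [] reads as getD: every key
-- accessed is provably present for n ≥ 1, so Python raises no KeyError there)
def stepA (p : Int) (st : StA) (v : Int) : StA :=
  let vmodp := PySem.Int.floordiv v p
  let D0 := st.S0.getD vmodp 0 - st.S0.getD (p - 1) 0
  let D1 := st.S1.getD vmodp 0 - st.S1.getD (p - 1) 0
  { S0 := st.S0.insert v (st.S0.getD v 0 - D0)
    S1 := st.S1.insert v (st.S1.getD v 0 - p * D1)
    SP := st.SP.insert v (st.SP.getD v 0 - p * (D1 - D0)) }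

-- A's inner loop with its 'break' on v < p2
def innerA (p p2 : Int) : List Int → StA → StA
  | [], st => st
  | v :: vs, st => if v < p2 then st else innerA p p2 vs (stepA p st v)

-- A's outer loop 'for p in range(2, p+1)'
def outerA (V : List Int) (ps : List Int) (st : StA) : StA :=
  ps.foldl (fun st p =>
    if st.S0.getD p 0 > st.S0.getD (p - 1) 0 then innerA p (p * p) V st else st) st

def sievecntsum (n : Int) : Int :=
  let p0 := pyIsqrt n
  let p := if (p0 + 1) ^ 2 ≤ n then p0 + 1 else p0
  let V1 := (PySem.List.pyRange 1 (p + 1) 1).map (fun i => PySem.Int.floordiv n i)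
  -- V[-1] raises IndexError for n = 0 (V1 = []); excluded by Pre_
  let V := V1 ++ PySem.List.pyRange (PySem.List.pyGetD V1 (-1) 0 - 1) 0 (-1)
  let S0 := V.foldl (fun d i => d.insert i (i - 1)) PySem.Dict.empty
  let S1 := V.foldl (fun d i => d.insert i (PySem.Int.floordiv (i * (i + 1)) 2 - 1)) PySem.Dict.empty
  let SP := V.foldl (fun d i => d.insert i (PySem.Int.floordiv (i * (i + 1)) 2 - 1)) PySem.Dict.empty
  let st := outerA V (PySem.List.pyRange 2 (p + 1) 1) ⟨S0, S1, SP⟩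
  PySem.Int.mod (st.SP.getD n 0) MOD

-- ===== PORT B =====

-- B's memo: value v ↦ its list of (count, sum, spf-sum) states, index = number
-- of discovered primes already applied to v (Python: memo = {v: [triples]})
def BMemo : Type := PySem.Dict Int (List (Int × Int × Int))

-- B's 'while jj < j' build-up loop and the recursive trip(v, j) itself.
-- fuel is a totality artefact only: every actual nested call strictly decreases
-- v, and fuel (chosen > v at top level) is proved never to run out on Pre_.
mutual
def tripB (primes : List Int) (cons : List (Int × Int)) (piSmall : List Int) :
    Nat → Int → Int → BMemo → (Int × Int × Int) × BMemo
  | 0, _, _, σ => ((0, 0, 0), σ)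
  | Nat.succ fuel, v, j, σ =>
    let cap := PySem.List.pyGetD piSmall (pyIsqrt v) 0
    let j := if j > cap then cap else j
    let (lst, σ1) :=
      match PySem.Dict.get? σ v with
      | some l => (l, σ)
      | none =>
        let s := PySem.Int.floordiv (v * (v + 1)) 2 - 1
        let l : List (Int × Int × Int) := [(v - 1, s, s)]
        (l, PySem.Dict.insert σ v l)
    let jj : Int := (lst.length : Int) - 1
    let t := PySem.List.pyGetD lst jj (0, 0, 0)
    let (lst2, σ2) := buildB primes cons piSmall fuel v (j - jj).toNat jj t lst σ1
    (PySem.List.pyGetD lst2 j (0, 0, 0), σ2)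
termination_by fuel v j σ => (fuel, 0, 0)

def buildB (primes : List Int) (cons : List (Int × Int)) (piSmall : List Int) :
    Nat → Int → Nat → Int → (Int × Int × Int) → List (Int × Int × Int) → BMemo →
      List (Int × Int × Int) × BMemo
  | _, _, 0, _, _, lst, σ => (lst, σ)
  | fuel, v, Nat.succ c, jj, t, lst, σ =>
    let p := PySem.List.pyGetD primes jj 0
    let cc := PySem.List.pyGetD cons jj (0, 0)
    let (d, σ1) := tripB primes cons piSmall fuel (PySem.Int.floordiv v p) jj σ
    let D0 := d.1 - cc.1
    let D1 := d.2.1 - cc.2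
    let t' := (t.1 - D0, t.2.1 - p * D1, t.2.2 - p * (D1 - D0))
    let lst' := lst ++ [t']
    let σ2 := PySem.Dict.insert σ1 v lst'
    buildB primes cons piSmall fuel v c (jj + 1) t' lst' σ2
termination_by fuel v c jj t lst σ => (fuel, 1, c)
end

-- B's prime-discovery loop state
structure DSt where
  primes : List Int
  cons : List (Int × Int)
  piSmall : List Int
  memo : BMemo
  cnt : Int

-- one iteration 'for k in range(2, r+1)' of B's discovery loop
def discBStep (fuel : Nat) (st : DSt) (k : Int) : DSt :=
  let (t1, σ1) := tripB st.primes st.cons st.piSmall fuel k st.cnt st.memo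
  let (t2, σ2) := tripB st.primes st.cons st.piSmall fuel (k - 1) st.cnt σ1
  if t1.1 > t2.1 then
    let (t3, σ3) := tripB st.primes st.cons st.piSmall fuel (k - 1) st.cnt σ2
    { primes := st.primes ++ [k]
      cons := st.cons ++ [(t3.1, t3.2.1)]
      piSmall := PySem.List.pySetD st.piSmall k (st.cnt + 1)
      memo := σ3
      cnt := st.cnt + 1 }
  else
    { st with piSmall := PySem.List.pySetD st.piSmall k st.cnt, memo := σ2 }

def sievecntsum_alt (n : Int) : Int :=
  let r := pyIsqrt n
  let fuel := n.toNat + 2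
  let init : DSt :=
    ⟨[], [], List.replicate (r + 2).toNat (0 : Int), PySem.Dict.empty, 0⟩
  let st := (PySem.List.pyRange 2 (r + 1) 1).foldl (discBStep fuel) init
  let (t, _) := tripB st.primes st.cons st.piSmall fuel n st.cnt st.memo
  PySem.Int.mod t.2.2 MOD

-- ===== PRECONDITION & SPEC =====

-- Pre_ excludes exactly n ≤ 0: math.isqrt raises ValueError for n < 0 and V[-1]
-- raises IndexError for n = 0.
def Pre_sievecntsum (n : Int) : Prop := 1 ≤ n
instance (n : Int) : Decidable (Pre_sievecntsum n) := by unfold Pre_sievecntsum; infer_instance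
def pvWitness_sievecntsum : Int := 10

def Spec_sievecntsum (n : Int) (out : Int) : Prop := out = sievecntsum_alt n
instance (n : Int) (out : Int) : Decidable (Spec_sievecntsum n out) := by unfold Spec_sievecntsum; infer_instance

-- ===== CLAIM (what is proved, stated in full; the proofs are below) =====
def Claim_equal_sievecntsum : Prop := ∀ (n : Int), Dom_sievecntsum n → Pre_sievecntsum n → Spec_sievecntsum n (sievecntsum n)

-- ===== LEMMAS AND PROOFS =====


-- ---------- square root and division facts ----------

def SqrtOK (n r : Int) : Prop := 1 ≤ n ∧ 1 ≤ r ∧ r * r ≤ n ∧ n < (r + 1) * (r + 1)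

theorem sqrtOK_pyIsqrt (n : Int) (hn : 1 ≤ n) : SqrtOK n (pyIsqrt n) := by
  have h1 := Nat.sqrt_le' n.toNat
  have h2 := Nat.lt_succ_sqrt' n.toNat
  zify at h1 h2
  rw [show ((n.toNat : Int)) = n by omega] at h1 h2
  refine ⟨hn, ?_, ?_, ?_⟩
  · simp only [pyIsqrt]
    have : 1 ≤ Nat.sqrt n.toNat := Nat.le_sqrt'.mpr (by omega)
    omega
  · simp only [pyIsqrt]; nlinarith [h1]
  · simp only [pyIsqrt]; nlinarith [h2]

theorem isqrt_le_iff (p v : Int) (hp : 0 ≤ p) (hv : 0 ≤ v) :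
    p ≤ pyIsqrt v ↔ p * p ≤ v := by
  have h1 := Nat.sqrt_le' v.toNat
  have h2 := Nat.lt_succ_sqrt' v.toNat
  zify at h1 h2
  rw [show ((v.toNat : Int)) = v by omega] at h1 h2
  simp only [pyIsqrt]
  constructor
  · intro h; nlinarith
  · intro h; nlinarith

theorem isqrt_mono (v w : Int) (h : v ≤ w) : pyIsqrt v ≤ pyIsqrt w := by
  simp only [pyIsqrt]
  have : v.toNat ≤ w.toNat := by omega
  exact_mod_cast Nat.sqrt_le_sqrt this

theorem isqrt_le_sub_one (k : Int) (hk : 2 ≤ k) : pyIsqrt k ≤ k - 1 := by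
  simp only [pyIsqrt]
  have h := Nat.sqrt_lt_self (n := k.toNat) (by omega)
  omega

theorem isqrt_nonneg (v : Int) : 0 ≤ pyIsqrt v := by
  simp only [pyIsqrt]; positivity

theorem ed_antitone (n a b : Int) (hn : 0 ≤ n) (ha : 0 < a) (hab : a ≤ b) : n / b ≤ n / a := by
  apply (Int.le_ediv_iff_mul_le ha).mpr
  calc n / b * a ≤ n / b * b :=
        mul_le_mul_of_nonneg_left hab (Int.ediv_nonneg hn (by omega))
    _ ≤ n := Int.ediv_mul_le n (by omega)

theorem oneLeDiv (n x : Int) (h1 : 1 ≤ x) (hx : x ≤ n) : 1 ≤ n / x :=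
  (Int.le_ediv_iff_mul_le (by omega)).mpr (by omega)

theorem divLeImp (n x : Int) (hx : 1 ≤ x) (h : 1 ≤ n / x) : x ≤ n := by
  by_contra hc
  have : n / x < 1 := (Int.ediv_lt_iff_lt_mul (by omega)).mpr (by omega)
  omega

theorem edivLtSelf (w p : Int) (hw : 1 ≤ w) (hp : 2 ≤ p) : w / p < w := by
  apply (Int.ediv_lt_iff_lt_mul (by omega)).mpr
  nlinarith

theorem divCompose (n j p : Int) (hj : 0 ≤ j) : n / j / p = n / (j * p) :=
  Int.ediv_ediv_of_nonneg hj

theorem divR1LeR (n r : Int) (h : SqrtOK n r) : n / (r + 1) ≤ r := by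
  obtain ⟨hn, hr, hrr, hrn⟩ := h
  have : n / (r + 1) < r + 1 := (Int.ediv_lt_iff_lt_mul (by omega)).mpr (by nlinarith)
  omega

theorem rLeDivR (n r : Int) (h : SqrtOK n r) : r ≤ n / r := by
  obtain ⟨hn, hr, hrr, hrn⟩ := h
  exact (Int.le_ediv_iff_mul_le (by omega)).mpr hrr

theorem strictDec (n r i j : Int) (h : SqrtOK n r) (hi : 1 ≤ i) (hij : i < j) (hjr : j ≤ r) :
    n / j < n / i := by
  obtain ⟨hn, hr, hrr, hrn⟩ := h
  have hle : n / j ≤ n / i := ed_antitone n i j (by omega) (by omega) (by omega)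
  rcases lt_or_eq_of_le hle with h' | heq
  · exact h'
  exfalso
  set m := n / j with hm
  have hmr : r ≤ m := le_trans (rLeDivR n r ⟨hn, hr, hrr, hrn⟩)
    (ed_antitone n j r (by omega) (by omega) hjr)
  have h1 : m * j ≤ n := (Int.le_ediv_iff_mul_le (by omega)).mp (le_refl m)
  have h2 : n < (m + 1) * i := (Int.ediv_lt_iff_lt_mul (by omega)).mp (by omega)
  nlinarith

-- ---------- the value list V and its closure properties ----------

def Vdef (n r : Int) : List Int :=
  ((PySem.List.pyRange 1 (r + 1) 1).map (fun i => n / i)) ++ PySem.List.pyRange (n / r - 1) 0 (-1)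

theorem mem_Vdef (n r v : Int) :
    v ∈ Vdef n r ↔ (∃ i, 1 ≤ i ∧ i ≤ r ∧ v = n / i) ∨ (1 ≤ v ∧ v ≤ n / r - 1) := by
  simp only [Vdef, List.mem_append, List.mem_map, PySem.List.mem_pyRange_one,
    PySem.List.mem_pyRange_neg_one]
  constructor
  · rintro (⟨i, ⟨h1, h2⟩, rfl⟩ | ⟨h1, h2⟩)
    · exact Or.inl ⟨i, h1, by omega, rfl⟩
    · exact Or.inr ⟨by omega, by omega⟩
  · rintro (⟨i, h1, h2, rfl⟩ | ⟨h1, h2⟩)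
    · exact Or.inl ⟨i, ⟨h1, by omega⟩, rfl⟩
    · exact Or.inr ⟨by omega, by omega⟩

theorem smallMemV (n r v : Int) (hs : SqrtOK n r) (h1 : 1 ≤ v) (h2 : v ≤ r) : v ∈ Vdef n r := by
  rcases le_or_gt v (n / r - 1) with hc | hc
  · exact (mem_Vdef n r v).mpr (Or.inr ⟨h1, hc⟩)
  · have hrd := rLeDivR n r hs
    have hnr : n / r = v := by omega
    exact (mem_Vdef n r v).mpr (Or.inl ⟨r, hs.2.1, le_refl r, hnr.symm⟩)

theorem largeMemV (n r j : Int) (h : SqrtOK n r) (h1 : 1 ≤ j) (h2 : j ≤ r) : n / j ∈ Vdef n r :=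
  (mem_Vdef n r (n / j)).mpr (Or.inl ⟨j, h1, h2, rfl⟩)

theorem memQuot (n r m : Int) (hs : SqrtOK n r) (h1 : 1 ≤ m) (h2 : m ≤ n) :
    n / m ∈ Vdef n r := by
  have hr1 := hs.2.1
  by_cases hm : m ≤ r
  · exact largeMemV n r m hs h1 hm
  · have hx : n / m ≤ n / (r + 1) :=
      ed_antitone n (r + 1) m (by omega) (by omega) (by omega)
    have h3 := divR1LeR n r hs
    have hnm1 : 1 ≤ n / m := oneLeDiv n m h1 h2
    have hler : n / m ≤ n / r := ed_antitone n r m (by omega) (by omega) (by omega)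
    rcases le_or_gt (n / m) (n / r - 1) with hc | hc
    · exact (mem_Vdef n r (n / m)).mpr (Or.inr ⟨hnm1, hc⟩)
    · have heq : n / m = n / r := by omega
      rw [heq]
      exact largeMemV n r r hs hs.2.1 (le_refl r)

theorem quotClosed (n r w k : Int) (hs : SqrtOK n r) (hw : w ∈ Vdef n r)
    (hk : 2 ≤ k) (hkk : k * k ≤ w) : w / k ∈ Vdef n r := by
  have hkq : k ≤ w / k := (Int.le_ediv_iff_mul_le (by omega)).mpr hkk
  rcases (mem_Vdef n r w).mp hw with ⟨i, hi1, hir, rfl⟩ | ⟨hw1, hw2⟩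
  · rw [divCompose n i k (by omega)]
    have h1 : 1 ≤ n / (i * k) := by rw [← divCompose n i k (by omega)]; omega
    have h2 : i * k ≤ n := divLeImp n (i * k) (by nlinarith) h1
    exact memQuot n r (i * k) hs (by nlinarith) h2
  · have hlt : w / k < w := edivLtSelf w k (by omega) hk
    exact (mem_Vdef n r (w / k)).mpr (Or.inr ⟨by omega, by omega⟩)

theorem Vpos (n r : Int) (h : SqrtOK n r) : ∀ v ∈ Vdef n r, 1 ≤ v := by
  intro v hv
  rcases (mem_Vdef n r v).mp hv with ⟨i, h1, h2, rfl⟩ | ⟨h1, _⟩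
  · refine oneLeDiv n i h1 ?_
    nlinarith [h.2.2.1, h.2.1]
  · exact h1

theorem Vsorted (n r : Int) (h : SqrtOK n r) : (Vdef n r).Pairwise (· > ·) := by
  rw [Vdef, List.pairwise_append]
  refine ⟨?_, ?_, ?_⟩
  · rw [List.pairwise_map]
    have hp := PySem.List.pairwise_lt_pyRange_one (a := 1) (b := r + 1)
    rw [List.Pairwise.and_mem] at hp
    refine hp.imp ?_
    rintro i j ⟨hi, hj, hij⟩
    rw [PySem.List.mem_pyRange_one] at hi hj
    exact strictDec n r i j h (by omega) hij (by omega)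
  · rw [PySem.List.pyRange_neg_one_eq_reverse, List.pairwise_reverse]
    refine (PySem.List.pairwise_lt_pyRange_one (a := 0 + 1) (b := n / r - 1 + 1)).imp ?_
    intro a b hab
    exact hab
  · intro a ha b hb
    simp only [List.mem_map, PySem.List.mem_pyRange_one] at ha
    rw [PySem.List.mem_pyRange_neg_one] at hb
    obtain ⟨i, ⟨hi1, hi2⟩, rfl⟩ := ha
    obtain ⟨hb1, hb2⟩ := hb
    obtain ⟨hn', hr', hrr, hrn⟩ := h
    have : n / r ≤ n / i := ed_antitone n i r (by omega) (by omega) (by omega)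
    linarith

-- ---------- the pure model: PT qs v = state of value v after the reversed prime prefix qs ----------

def seedT (v : Int) : Int × Int × Int := (v - 1, v * (v + 1) / 2 - 1, v * (v + 1) / 2 - 1)

def PT : List Int → Int → Int × Int × Int
  | [], v => seedT v
  | p :: qs, v =>
    if p * p ≤ v then
      let t := PT qs v
      let c := PT qs (p - 1)
      let d := PT qs (v / p)
      (t.1 - (d.1 - c.1), t.2.1 - p * (d.2.1 - c.2.1),
        t.2.2 - p * ((d.2.1 - c.2.1) - (d.1 - c.1)))
    else PT qs v

-- the canonical discovered-prime accumulator (reversed order), shared by both proofs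
def discStep (qs : List Int) (k : Int) : List Int :=
  if (PT qs k).1 > (PT qs (k - 1)).1 then k :: qs else qs

def discList (K : Int) : List Int := (PySem.List.pyRange 2 (K + 1) 1).foldl discStep []

-- ---------- A-side: characterisation of the dict sieve by PT ----------

theorem getD_foldl_insert_fn (l : List Int) (f : Int → Int) (d : PySem.Dict Int Int) (w : Int) :
    (l.foldl (fun d i => d.insert i (f i)) d).getD w 0 = if w ∈ l then f w else d.getD w 0 := by
  induction l generalizing d with
  | nil => simp
  | cons x l ih =>
    simp only [List.foldl_cons, ih, List.mem_cons, PySem.Dict.getD_insert]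
    by_cases hw : w ∈ l
    · simp [hw]
    · by_cases hx : w = x <;> simp [hw, hx]

def dA0 (p : Int) (a : StA) (w : Int) : Int := a.S0.getD (w / p) 0 - a.S0.getD (p - 1) 0
def dA1 (p : Int) (a : StA) (w : Int) : Int := a.S1.getD (w / p) 0 - a.S1.getD (p - 1) 0

theorem stepA_getD (p : Int) (hp : 0 < p) (st : StA) (v x : Int) :
    (stepA p st v).S0.getD x 0 = (if x = v then st.S0.getD v 0 - dA0 p st v else st.S0.getD x 0) ∧
    (stepA p st v).S1.getD x 0 = (if x = v then st.S1.getD v 0 - p * dA1 p st v else st.S1.getD x 0) ∧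
    (stepA p st v).SP.getD x 0 =
      (if x = v then st.SP.getD v 0 - p * (dA1 p st v - dA0 p st v) else st.SP.getD x 0) := by
  simp only [stepA, dA0, dA1, PySem.Int.floordiv_eq_ediv_of_pos hp, PySem.Dict.getD_insert]
  exact ⟨trivial, trivial, trivial⟩

theorem innerA_char (p p2 : Int) (hp : 2 ≤ p) (hp2 : p2 = p * p) :
    ∀ (vs : List Int) (st : StA), vs.Pairwise (· > ·) → (∀ v ∈ vs, 1 ≤ v) → ∀ w,
      ((innerA p p2 vs st).S0.getD w 0 =
        if w ∈ vs ∧ p2 ≤ w then st.S0.getD w 0 - dA0 p st w else st.S0.getD w 0) ∧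
      ((innerA p p2 vs st).S1.getD w 0 =
        if w ∈ vs ∧ p2 ≤ w then st.S1.getD w 0 - p * dA1 p st w else st.S1.getD w 0) ∧
      ((innerA p p2 vs st).SP.getD w 0 =
        if w ∈ vs ∧ p2 ≤ w then st.SP.getD w 0 - p * (dA1 p st w - dA0 p st w)
        else st.SP.getD w 0) := by
  intro vs
  induction vs with
  | nil => intro st _ _ w; simp [innerA]
  | cons v vs ih =>
    intro st hsort hpos w
    have hhead : ∀ x ∈ vs, v > x := fun x hx => List.rel_of_pairwise_cons hsort hx
    have htail : vs.Pairwise (· > ·) := hsort.of_cons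
    have hpos' : ∀ x ∈ vs, 1 ≤ x := fun x hx => hpos x (List.mem_cons_of_mem v hx)
    have hv1 : 1 ≤ v := hpos v List.mem_cons_self
    have hp2pos : p - 1 < p2 := by nlinarith
    by_cases hbr : v < p2
    · simp only [innerA, if_pos hbr]
      have hcond : ¬ (w ∈ v :: vs ∧ p2 ≤ w) := by
        rintro ⟨hw, hwp2⟩
        rcases List.mem_cons.mp hw with rfl | hw'
        · omega
        · have := hhead w hw'; omega
      exact ⟨by rw [if_neg hcond], by rw [if_neg hcond], by rw [if_neg hcond]⟩
    · simp only [innerA, if_neg hbr]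
      have hvp2 : p2 ≤ v := by omega
      obtain ⟨i0, i1, ip⟩ := ih (stepA p st v) htail hpos' w
      obtain ⟨s0, s1, sp⟩ := stepA_getD p (by omega) st v w
      by_cases hw : w ∈ vs
      · have hwv : w < v := hhead w hw
        have hw1 : 1 ≤ w := hpos' w hw
        have hne : w ≠ v := by omega
        have hdiv : w / p < v := by
          have h1 : w / p < w := by
            apply (Int.ediv_lt_iff_lt_mul (by omega)).mpr
            nlinarith
          omega
        have hd0 : dA0 p (stepA p st v) w = dA0 p st w := by
          obtain ⟨a0, _, _⟩ := stepA_getD p (by omega) st v (w / p)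
          obtain ⟨b0, _, _⟩ := stepA_getD p (by omega) st v (p - 1)
          simp only [dA0, a0, b0]
          rw [if_neg (by omega), if_neg (by omega)]
        have hd1 : dA1 p (stepA p st v) w = dA1 p st w := by
          obtain ⟨_, a1, _⟩ := stepA_getD p (by omega) st v (w / p)
          obtain ⟨_, b1, _⟩ := stepA_getD p (by omega) st v (p - 1)
          simp only [dA1, a1, b1]
          rw [if_neg (by omega), if_neg (by omega)]
        refine ⟨?_, ?_, ?_⟩
        · rw [i0, hd0, s0, if_neg hne]
          by_cases hc : p2 ≤ w
          · rw [if_pos ⟨hw, hc⟩, if_pos (by exact ⟨List.mem_cons_of_mem v hw, hc⟩)]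
          · rw [if_neg (by tauto), if_neg (by tauto)]
        · rw [i1, hd1, s1, if_neg hne]
          by_cases hc : p2 ≤ w
          · rw [if_pos ⟨hw, hc⟩, if_pos (by exact ⟨List.mem_cons_of_mem v hw, hc⟩)]
          · rw [if_neg (by tauto), if_neg (by tauto)]
        · rw [ip, hd0, hd1, sp, if_neg hne]
          by_cases hc : p2 ≤ w
          · rw [if_pos ⟨hw, hc⟩, if_pos (by exact ⟨List.mem_cons_of_mem v hw, hc⟩)]
          · rw [if_neg (by tauto), if_neg (by tauto)]
      · have hvnotin : v ∉ vs := fun hc => absurd (hhead v hc) (lt_irrefl v)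
        by_cases hwv : w = v
        · subst hwv
          refine ⟨?_, ?_, ?_⟩
          · rw [i0, if_neg (by tauto), s0, if_pos rfl, if_pos ⟨List.mem_cons_self, hvp2⟩]
          · rw [i1, if_neg (by tauto), s1, if_pos rfl, if_pos ⟨List.mem_cons_self, hvp2⟩]
          · rw [ip, if_neg (by tauto), sp, if_pos rfl, if_pos ⟨List.mem_cons_self, hvp2⟩]
        · have hcond : ¬ (w ∈ v :: vs ∧ p2 ≤ w) := by
            rintro ⟨hmem, _⟩
            rcases List.mem_cons.mp hmem with rfl | h'
            · exact hwv rfl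
            · exact hw h'
          refine ⟨?_, ?_, ?_⟩
          · rw [i0, if_neg (by tauto), s0, if_neg hwv, if_neg hcond]
          · rw [i1, if_neg (by tauto), s1, if_neg hwv, if_neg hcond]
          · rw [ip, if_neg (by tauto), sp, if_neg hwv, if_neg hcond]

def InvA (n r : Int) (st : StA) (qs : List Int) : Prop :=
  ∀ v ∈ Vdef n r,
    st.S0.getD v 0 = (PT qs v).1 ∧ st.S1.getD v 0 = (PT qs v).2.1 ∧
    st.SP.getD v 0 = (PT qs v).2.2

theorem A_round (n r k : Int) (hs : SqrtOK n r) (hk : 2 ≤ k) (hkr : k ≤ r)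
    (st : StA) (qs : List Int) (h : InvA n r st qs) :
    InvA n r (innerA k (k * k) (Vdef n r) st) (k :: qs) := by
  intro v hv
  obtain ⟨c0, c1, cp⟩ := innerA_char k (k * k) hk rfl (Vdef n r) st
    (Vsorted n r hs) (Vpos n r hs) v
  by_cases hkk : k * k ≤ v
  · have hq : v / k ∈ Vdef n r := quotClosed n r v k hs hv hk hkk
    have hk1 : k - 1 ∈ Vdef n r := smallMemV n r (k - 1) hs (by omega) (by omega)
    obtain ⟨e0, e1, ep⟩ := h v hv
    obtain ⟨f0, f1, fp⟩ := h (v / k) hq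
    obtain ⟨g0, g1, gp⟩ := h (k - 1) hk1
    have hd0 : dA0 k st v = (PT qs (v / k)).1 - (PT qs (k - 1)).1 := by
      rw [dA0, f0, g0]
    have hd1 : dA1 k st v = (PT qs (v / k)).2.1 - (PT qs (k - 1)).2.1 := by
      rw [dA1, f1, g1]
    refine ⟨?_, ?_, ?_⟩
    · rw [c0, if_pos ⟨hv, hkk⟩, e0, hd0]
      simp only [PT, if_pos hkk]
    · rw [c1, if_pos ⟨hv, hkk⟩, e1, hd1]
      simp only [PT, if_pos hkk]
    · rw [cp, if_pos ⟨hv, hkk⟩, ep, hd0, hd1]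
      simp only [PT, if_pos hkk]
  · obtain ⟨e0, e1, ep⟩ := h v hv
    refine ⟨?_, ?_, ?_⟩
    · rw [c0, if_neg (by tauto), e0]; simp only [PT, if_neg hkk]
    · rw [c1, if_neg (by tauto), e1]; simp only [PT, if_neg hkk]
    · rw [cp, if_neg (by tauto), ep]; simp only [PT, if_neg hkk]

theorem A_outer (n r : Int) (hs : SqrtOK n r) :
    ∀ (ks : List Int), (∀ k ∈ ks, 2 ≤ k ∧ k ≤ r) → ∀ st qs, InvA n r st qs →
      InvA n r (outerA (Vdef n r) ks st) (ks.foldl discStep qs) := by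
  intro ks
  induction ks with
  | nil => intro _ st qs h; exact h
  | cons k ks ih =>
    intro hks st qs h
    obtain ⟨hk2, hkr⟩ := hks k List.mem_cons_self
    have hAstep : outerA (Vdef n r) (k :: ks) st =
        outerA (Vdef n r) ks
          (if st.S0.getD k 0 > st.S0.getD (k - 1) 0 then innerA k (k * k) (Vdef n r) st
           else st) := rfl
    have hfold : (k :: ks).foldl discStep qs = ks.foldl discStep (discStep qs k) := rfl
    rw [hAstep, hfold]
    obtain ⟨e0, _, _⟩ := h k (smallMemV n r k hs (by omega) hkr)
    obtain ⟨f0, _, _⟩ := h (k - 1) (smallMemV n r (k - 1) hs (by omega) (by omega))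
    by_cases hg : st.S0.getD k 0 > st.S0.getD (k - 1) 0
    · rw [if_pos hg]
      have hd : discStep qs k = k :: qs := by
        rw [discStep, if_pos (by rw [← e0, ← f0]; exact hg)]
      rw [hd]
      exact ih (fun q hq => hks q (List.mem_cons_of_mem k hq)) _ _
        (A_round n r k hs hk2 hkr st qs h)
    · rw [if_neg hg]
      have hd : discStep qs k = qs := by
        rw [discStep, if_neg (by rw [← e0, ← f0]; exact hg)]
      rw [hd]
      exact ih (fun q hq => hks q (List.mem_cons_of_mem k hq)) _ _ h

theorem A_init (n r : Int) (hs : SqrtOK n r) :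
    InvA n r
      ⟨(Vdef n r).foldl (fun d i => d.insert i (i - 1)) PySem.Dict.empty,
       (Vdef n r).foldl
         (fun d i => d.insert i (PySem.Int.floordiv (i * (i + 1)) 2 - 1)) PySem.Dict.empty,
       (Vdef n r).foldl
         (fun d i => d.insert i (PySem.Int.floordiv (i * (i + 1)) 2 - 1)) PySem.Dict.empty⟩
      [] := by
  intro v hv
  have hfd : PySem.Int.floordiv (v * (v + 1)) 2 = v * (v + 1) / 2 :=
    PySem.Int.floordiv_eq_ediv_of_pos (by omega)
  refine ⟨?_, ?_, ?_⟩ <;>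
    simp only [getD_foldl_insert_fn, if_pos hv, PT, seedT, hfd]

theorem A_char (n : Int) (hn : 1 ≤ n) :
    sievecntsum n = PySem.Int.mod ((PT (discList (pyIsqrt n)) n).2.2) MOD := by
  obtain ⟨r, hrdef⟩ : ∃ r, pyIsqrt n = r := ⟨_, rfl⟩
  have hs : SqrtOK n r := hrdef ▸ sqrtOK_pyIsqrt n hn
  obtain ⟨-, hr1, hrr, hrn⟩ := hs
  have hs : SqrtOK n r := ⟨hn, hr1, hrr, hrn⟩
  have hadj : ¬ ((r + 1) ^ 2 ≤ n) := by
    have hsq : (r + 1) ^ 2 = (r + 1) * (r + 1) := by ring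
    rw [hsq]; linarith
  simp only [sievecntsum]
  rw [hrdef, if_neg hadj]
  have hmapflo : (PySem.List.pyRange 1 (r + 1) 1).map (fun i => PySem.Int.floordiv n i) =
      (PySem.List.pyRange 1 (r + 1) 1).map (fun i => n / i) := by
    refine List.map_congr_left ?_
    intro i hi
    rw [PySem.List.mem_pyRange_one] at hi
    exact PySem.Int.floordiv_eq_ediv_of_pos (by omega)
  rw [hmapflo]
  have hlast : PySem.List.pyGetD ((PySem.List.pyRange 1 (r + 1) 1).map (fun i => n / i))
      (-1) 0 = n / r := by
    rw [PySem.List.pyRange_one_succ_right (by omega : (1:Int) ≤ r), List.map_append]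
    simp [PySem.List.pyGetD_neg_one_append_singleton]
  rw [hlast]
  have hVfold : ((PySem.List.pyRange 1 (r + 1) 1).map (fun i => n / i)) ++
      PySem.List.pyRange (n / r - 1) 0 (-1) = Vdef n r := rfl
  rw [hVfold]
  have hps : ∀ k ∈ PySem.List.pyRange 2 (r + 1) 1, 2 ≤ k ∧ k ≤ r := by
    intro k hk
    rw [PySem.List.mem_pyRange_one] at hk
    omega
  have hinv := A_outer n r hs (PySem.List.pyRange 2 (r + 1) 1) hps _ [] (A_init n r hs)
  have hnV : n ∈ Vdef n r := by
    have := largeMemV n r 1 hs (by omega) (by omega)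
    rwa [Int.ediv_one] at this
  obtain ⟨-, -, hsp⟩ := hinv n hnV
  rw [hsp, discList]


-- ---------- B-side: sorted-prefix counting and the cap ----------

def countLeN (ps : List Int) (x : Int) : Nat := ps.countP (fun p => decide (p ≤ x))

theorem countLeN_le_length (ps : List Int) (x : Int) : countLeN ps x ≤ ps.length :=
  List.countP_le_length

theorem countLeN_append (ps qs : List Int) (x : Int) :
    countLeN (ps ++ qs) x = countLeN ps x + countLeN qs x := by
  simp [countLeN, List.countP_append]

theorem countLeN_all (ps : List Int) (x : Int) (h : ∀ p ∈ ps, p ≤ x) :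
    countLeN ps x = ps.length := by
  induction ps with
  | nil => rfl
  | cons a t ih =>
    have ha : a ≤ x := h a List.mem_cons_self
    simp only [countLeN, List.countP_cons] at *
    rw [ih (fun p hp => h p (List.mem_cons_of_mem a hp))]
    simp [ha]

theorem countLeN_zero_of_gt (ps : List Int) (x : Int) (h : ∀ p ∈ ps, x < p) :
    countLeN ps x = 0 := by
  induction ps with
  | nil => rfl
  | cons a t ih =>
    have ha : x < a := h a List.mem_cons_self
    simp only [countLeN, List.countP_cons] at *
    rw [ih (fun p hp => h p (List.mem_cons_of_mem a hp))]
    simp [show ¬ a ≤ x by omega]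

theorem sorted_getD_le_iff (ps : List Int) (hs : ps.Pairwise (· < ·)) (x : Int) :
    ∀ i : Nat, i < ps.length → (ps.getD i 0 ≤ x ↔ i < countLeN ps x) := by
  induction ps with
  | nil => intro i hi; simp at hi
  | cons a t ih =>
    intro i hi
    have hhead : ∀ p ∈ t, a < p := fun p hp => List.rel_of_pairwise_cons hs hp
    have htail := hs.of_cons
    by_cases ha : a ≤ x
    · have hc : countLeN (a :: t) x = countLeN t x + 1 := by
        simp [countLeN, List.countP_cons, ha]
      cases i with
      | zero => simp [hc, ha]
      | succ m =>
        have hm : m < t.length := by simpa using hi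
        have := ih htail m hm
        simp only [List.getD_cons_succ, hc]
        omega
    · have hz : countLeN t x = 0 :=
        countLeN_zero_of_gt t x (fun p hp => lt_trans (by omega) (hhead p hp))
      have hc : countLeN (a :: t) x = 0 := by
        simp [countLeN, List.countP_cons, ha, countLeN] at *
        omega
      cases i with
      | zero => simp [hc, ha]
      | succ m =>
        have hm : m < t.length := by simpa using hi
        have hgt : x < t.getD m 0 := by
          have hmem : t.getD m 0 ∈ t := by
            rw [List.getD_eq_getElem t 0 hm]
            exact List.getElem_mem hm
          exact lt_trans (by omega) (hhead _ hmem)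
        simp only [List.getD_cons_succ, hc]
        omega

theorem getD_snoc_lt {α : Type} [Inhabited α] (xs : List α) (y : α) (i : Nat) (d : α)
    (h : i < xs.length) : (xs ++ [y]).getD i d = xs.getD i d := by
  rw [List.getD_eq_getElem?_getD, List.getElem?_append_left h, ← List.getD_eq_getElem?_getD]

theorem getD_snoc_eq {α : Type} (xs : List α) (y : α) (d : α) :
    (xs ++ [y]).getD xs.length d = y := by
  rw [List.getD_eq_getElem?_getD, List.getElem?_append_right (le_refl _)]
  simp

theorem take_snoc (ps : List Int) (j : Nat) (hj : j < ps.length) :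
    ps.take (j + 1) = ps.take j ++ [ps.getD j 0] := by
  rw [List.take_succ, List.getElem?_eq_getElem hj, List.getD_eq_getElem ps 0 hj]
  rfl

-- dropping inadmissible stages (primes whose square exceeds v) is a PT no-op
theorem PT_peel (ps : List Int) (hs : ps.Pairwise (· < ·)) (hpos : ∀ p ∈ ps, 0 ≤ p)
    (v : Int) (hv : 0 ≤ v) :
    ∀ j : Nat, j ≤ ps.length → countLeN ps (pyIsqrt v) ≤ j →
      PT ((ps.take j).reverse) v = PT ((ps.take (countLeN ps (pyIsqrt v))).reverse) v := by
  intro j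
  induction j with
  | zero => intro _ hc; interval_cases h : countLeN ps (pyIsqrt v) <;> rfl
  | succ m ih =>
    intro hlen hcap
    rcases Nat.lt_or_ge (countLeN ps (pyIsqrt v)) (m + 1) with hlt | hge
    · have hm : m < ps.length := hlen
      have hp : ¬ (ps.getD m 0 ≤ pyIsqrt v) := by
        rw [sorted_getD_le_iff ps hs (pyIsqrt v) m hm]
        omega
      have hmem : ps.getD m 0 ∈ ps := by
        rw [List.getD_eq_getElem ps 0 hm]; exact List.getElem_mem hm
      have hpp : ¬ (ps.getD m 0 * ps.getD m 0 ≤ v) := by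
        rw [← isqrt_le_iff _ _ (hpos _ hmem) hv]
        exact hp
      rw [take_snoc ps m hm, List.reverse_append]
      simp only [List.reverse_cons, List.reverse_nil, List.nil_append, List.cons_append,
        List.nil_append, PT, if_neg hpp]
      exact ih (by omega) (by omega)
    · have : countLeN ps (pyIsqrt v) = m + 1 := by omega
      rw [this]

-- ---------- B-side invariants ----------

def PrimesOK (primes : List Int) (K : Int) : Prop :=
  primes.Pairwise (· < ·) ∧ ∀ p ∈ primes, 2 ≤ p ∧ p ≤ K

def ConsOK (primes : List Int) (cons : List (Int × Int)) : Prop :=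
  cons.length = primes.length ∧
  ∀ i : Nat, i < primes.length →
    cons.getD i (0, 0) =
      ((PT ((primes.take i).reverse) (primes.getD i 0 - 1)).1,
       (PT ((primes.take i).reverse) (primes.getD i 0 - 1)).2.1)

def PiOK (r K : Int) (primes piSmall : List Int) : Prop :=
  piSmall.length = (r + 2).toNat ∧
  ∀ x : Int, 0 ≤ x → x ≤ K → PySem.List.pyGetD piSmall x 0 = (countLeN primes x : Int)

def MemoOK (primes : List Int) (σ : BMemo) : Prop :=
  ∀ v lst, PySem.Dict.get? σ v = some lst →
    lst ≠ [] ∧ lst.length ≤ countLeN primes (pyIsqrt v) + 1 ∧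
    ∀ i : Nat, i < lst.length →
      lst.getD i (0, 0, 0) = PT ((primes.take i).reverse) v

theorem getSet (xs : List Int) (i v m : Int) (h0 : 0 ≤ i) (h : i < (xs.length : Int))
    (hm : 0 ≤ m) :
    PySem.List.pyGetD (PySem.List.pySetD xs i v) m 0 =
      if m = i then v else PySem.List.pyGetD xs m 0 := by
  obtain ⟨k, rfl⟩ : ∃ k : Nat, i = (k : Int) := ⟨i.toNat, by omega⟩
  obtain ⟨km, rfl⟩ : ∃ km : Nat, m = (km : Int) := ⟨m.toNat, by omega⟩
  rw [PySem.List.pyGetD_pySetD_natCast xs k km v 0 (by exact_mod_cast h)]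
  by_cases hkk : km = k
  · simp [hkk]
  · rw [if_neg hkk, if_neg (by exact_mod_cast hkk)]

-- ---------- the trip(v, j) recursion computes PT ----------

theorem buildB_spec (r K : Int) (primes : List Int) (cons : List (Int × Int))
    (piSmall : List Int) (hP : PrimesOK primes K) (hC : ConsOK primes cons)
    (v : Int) (hv : 0 ≤ v) (hKv : pyIsqrt v ≤ K)
    (IH : ∀ w : Int, 0 ≤ w → w.toNat < v.toNat → ∀ (fuel : Nat) (j : Int) (σ : BMemo),
        w.toNat < fuel → 0 ≤ j → j ≤ (primes.length : Int) → pyIsqrt w ≤ K →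
        MemoOK primes σ →
        (tripB primes cons piSmall fuel w j σ).1 = PT ((primes.take j.toNat).reverse) w ∧
        MemoOK primes (tripB primes cons piSmall fuel w j σ).2) :
    ∀ (c : Nat) (jj : Int) (t : Int × Int × Int) (lst : List (Int × Int × Int)) (σ : BMemo)
      (fuel : Nat),
      v.toNat ≤ fuel → 0 ≤ jj → lst.length = jj.toNat + 1 →
      (jj + c : Int) ≤ (countLeN primes (pyIsqrt v) : Nat) →
      (∀ i : Nat, i < lst.length → lst.getD i (0, 0, 0) = PT ((primes.take i).reverse) v) →
      t = PT ((primes.take jj.toNat).reverse) v →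
      MemoOK primes σ →
      (buildB primes cons piSmall fuel v c jj t lst σ).1.length = jj.toNat + c + 1 ∧
      (∀ i : Nat, i < (buildB primes cons piSmall fuel v c jj t lst σ).1.length →
        (buildB primes cons piSmall fuel v c jj t lst σ).1.getD i (0, 0, 0) =
          PT ((primes.take i).reverse) v) ∧
      MemoOK primes (buildB primes cons piSmall fuel v c jj t lst σ).2 := by
  intro c
  induction c with
  | zero =>
    intro jj t lst σ fuel hfuel hjj hlen hcap hlst ht hσ
    simp only [buildB]
    exact ⟨by simpa using hlen, by simpa using hlst, hσ⟩
  | succ c ihc =>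
    intro jj t lst σ fuel hfuel hjj hlen hcap hlst ht hσ
    have hcapN : jj.toNat + (c + 1) ≤ countLeN primes (pyIsqrt v) := by
      push_cast at hcap; omega
    have hjlt : jj.toNat < primes.length :=
      lt_of_lt_of_le (by omega) (countLeN_le_length primes (pyIsqrt v))
    -- the prime at index jj
    have hpg : PySem.List.pyGetD primes jj 0 = primes.getD jj.toNat 0 := by
      obtain ⟨k, hk⟩ : ∃ k : Nat, jj = (k : Int) := ⟨jj.toNat, by omega⟩
      subst hk
      rw [PySem.List.pyGetD_natCast]
      simp
    set p := primes.getD jj.toNat 0 with hpdef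
    have hpmem : p ∈ primes := by
      rw [hpdef, List.getD_eq_getElem primes 0 hjlt]
      exact List.getElem_mem hjlt
    have hp2 : 2 ≤ p := (hP.2 p hpmem).1
    have hple : p ≤ pyIsqrt v := by
      rw [sorted_getD_le_iff primes hP.1 (pyIsqrt v) jj.toNat hjlt]
      omega
    have hppv : p * p ≤ v := by
      rw [← isqrt_le_iff p v (by omega) hv]
      exact hple
    have hv4 : 4 ≤ v := by nlinarith
    -- the cons entry at index jj
    have hcg : PySem.List.pyGetD cons jj (0, 0) = cons.getD jj.toNat (0, 0) := by
      obtain ⟨k, hk⟩ : ∃ k : Nat, jj = (k : Int) := ⟨jj.toNat, by omega⟩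
      subst hk
      rw [PySem.List.pyGetD_natCast]
      simp
    have hcons := hC.2 jj.toNat hjlt
    -- the recursive call
    have hflo : PySem.Int.floordiv v p = v / p :=
      PySem.Int.floordiv_eq_ediv_of_pos (by omega)
    have hwlt : v / p < v := edivLtSelf v p (by omega) hp2
    have hw0 : 0 ≤ v / p := Int.ediv_nonneg (by omega) (by omega)
    obtain ⟨hd, hσ1⟩ := IH (v / p) hw0 (by omega) fuel jj σ (by omega) hjj
      (by omega)
      (le_trans (isqrt_mono _ _ (le_of_lt hwlt)) hKv) hσ
    -- one unfolding of buildB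
    rw [buildB]
    simp only [hpg, hcg, hflo, ← hpdef]
    have hstep : PT ((primes.take (jj.toNat + 1)).reverse) v =
        ((PT ((primes.take jj.toNat).reverse) v).1 -
          ((PT ((primes.take jj.toNat).reverse) (v / p)).1 -
            (PT ((primes.take jj.toNat).reverse) (p - 1)).1),
         (PT ((primes.take jj.toNat).reverse) v).2.1 -
          p * ((PT ((primes.take jj.toNat).reverse) (v / p)).2.1 -
            (PT ((primes.take jj.toNat).reverse) (p - 1)).2.1),
         (PT ((primes.take jj.toNat).reverse) v).2.2 -
          p * (((PT ((primes.take jj.toNat).reverse) (v / p)).2.1 -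
            (PT ((primes.take jj.toNat).reverse) (p - 1)).2.1) -
            ((PT ((primes.take jj.toNat).reverse) (v / p)).1 -
              (PT ((primes.take jj.toNat).reverse) (p - 1)).1))) := by
      rw [take_snoc primes jj.toNat hjlt, List.reverse_append]
      simp only [List.reverse_cons, List.reverse_nil, List.nil_append, List.cons_append,
        List.nil_append, ← hpdef, PT, if_pos hppv]
    have hres := ihc (jj + 1)
      (PT ((primes.take (jj.toNat + 1)).reverse) v)
      (lst ++ [PT ((primes.take (jj.toNat + 1)).reverse) v])
      (PySem.Dict.insert (tripB primes cons piSmall fuel (v / p) jj σ).2 v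
        (lst ++ [PT ((primes.take (jj.toNat + 1)).reverse) v]))
      fuel hfuel (by omega)
      (by rw [List.length_append, hlen]; simp; omega)
      (by push_cast; push_cast at hcap; omega)
      (by
        intro i hi
        rw [List.length_append, hlen] at hi
        simp only [List.length_cons, List.length_nil] at hi
        rcases Nat.lt_or_ge i (lst.length) with hilt | hige
        · rw [getD_snoc_lt lst _ i _ hilt]
          exact hlst i hilt
        · have hieq : i = jj.toNat + 1 := by omega
          have : i = lst.length := by omega
          subst this
          rw [getD_snoc_eq, hlen]
          )
      (by rw [show (jj + 1).toNat = jj.toNat + 1 by omega])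
      (by
        -- the inserted entry is valid, the rest kept
        intro w lstw hw
        rw [PySem.Dict.get?_insert] at hw
        by_cases hwv : w = v
        · subst hwv
          rw [if_pos rfl] at hw
          injection hw with hw
          rw [← hw]
          refine ⟨by simp, ?_, ?_⟩
          · rw [List.length_append, hlen]
            simp only [List.length_cons, List.length_nil]
            omega
          · intro i hi
            rw [List.length_append, hlen] at hi
            simp only [List.length_cons, List.length_nil] at hi
            rcases Nat.lt_or_ge i (lst.length) with hilt | hige
            · rw [getD_snoc_lt lst _ i _ hilt]; exact hlst i hilt
            · have : i = lst.length := by omega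
              subst this
              rw [getD_snoc_eq, hlen]
        · rw [if_neg hwv] at hw
          exact hσ1 w lstw hw)
    -- assemble: the computed tuple is exactly the next PT stage
    have htup : (t.1 - ((PT ((primes.take jj.toNat).reverse) (v / p)).1 - (cons.getD jj.toNat (0, 0)).1),
        t.2.1 - p * ((PT ((primes.take jj.toNat).reverse) (v / p)).2.1 - (cons.getD jj.toNat (0, 0)).2),
        t.2.2 - p * (((PT ((primes.take jj.toNat).reverse) (v / p)).2.1 - (cons.getD jj.toNat (0, 0)).2) -
          ((PT ((primes.take jj.toNat).reverse) (v / p)).1 - (cons.getD jj.toNat (0, 0)).1))) =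
        PT ((primes.take (jj.toNat + 1)).reverse) v := by
      rw [hstep, ht, hcons]
    rw [hd]
    simp only [htup]
    have hjj1 : (jj + 1).toNat = jj.toNat + 1 := by omega
    rw [← hjj1] at hres ⊢
    constructor
    · rw [hres.1]; omega
    · exact ⟨hres.2.1, hres.2.2⟩

theorem tripB_spec (r K : Int) (primes : List Int) (cons : List (Int × Int))
    (piSmall : List Int) (hP : PrimesOK primes K) (hC : ConsOK primes cons)
    (hpi : PiOK r K primes piSmall) :
    ∀ (N : Nat) (v : Int), v.toNat < N → 0 ≤ v → pyIsqrt v ≤ K →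
      ∀ (fuel : Nat) (j : Int) (σ : BMemo), v.toNat < fuel → 0 ≤ j →
        j ≤ (primes.length : Int) → MemoOK primes σ →
        (tripB primes cons piSmall fuel v j σ).1 = PT ((primes.take j.toNat).reverse) v ∧
        MemoOK primes (tripB primes cons piSmall fuel v j σ).2 := by
  intro N
  induction N with
  | zero => intro v hv; omega
  | succ N ihN =>
    intro v hvN hv hKv fuel j σ hfuel hj hjlen hσ
    obtain ⟨f, rfl⟩ : ∃ f, fuel = f + 1 := ⟨fuel - 1, by omega⟩
    have hpos : ∀ p ∈ primes, 0 ≤ p := fun p hp => by have := (hP.2 p hp).1; omega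
    have hcapv : PySem.List.pyGetD piSmall (pyIsqrt v) 0 =
        (countLeN primes (pyIsqrt v) : Int) := hpi.2 (pyIsqrt v) (isqrt_nonneg v) hKv
    have IHw : ∀ w : Int, 0 ≤ w → w.toNat < v.toNat → ∀ (fuel : Nat) (j : Int) (σ : BMemo),
        w.toNat < fuel → 0 ≤ j → j ≤ (primes.length : Int) → pyIsqrt w ≤ K →
        MemoOK primes σ →
        (tripB primes cons piSmall fuel w j σ).1 = PT ((primes.take j.toNat).reverse) w ∧
        MemoOK primes (tripB primes cons piSmall fuel w j σ).2 :=
      fun w hw0 hwlt fuel' j' σ' hf' hj' hjl' hK' hσ' =>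
        ihN w (by omega) hw0 hK' fuel' j' σ' hf' hj' hjl' hσ'
    simp only [tripB]
    rw [hcapv]
    set C : Int := (countLeN primes (pyIsqrt v) : Int) with hCdef
    have hC0 : 0 ≤ C := by rw [hCdef]; positivity
    have hClen : C ≤ (primes.length : Int) := by
      rw [hCdef]
      exact_mod_cast countLeN_le_length primes (pyIsqrt v)
    set j2 : Int := if j > C then C else j with hj2def
    have hj20 : 0 ≤ j2 := by rw [hj2def]; split <;> omega
    have hj2C : j2 ≤ C := by rw [hj2def]; split <;> omega
    have hj2j : j2 ≤ j := by rw [hj2def]; split <;> omega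
    -- the two memo branches produce a valid stage list and a valid memo
    have hbranch : ∀ (lst : List (Int × Int × Int)) (σ1 : BMemo),
        lst ≠ [] → (lst.length : Int) ≤ C + 1 →
        (∀ i : Nat, i < lst.length → lst.getD i (0, 0, 0) = PT ((primes.take i).reverse) v) →
        MemoOK primes σ1 →
        (PySem.List.pyGetD
            (buildB primes cons piSmall f v (j2 - ((lst.length : Int) - 1)).toNat
              ((lst.length : Int) - 1)
              (PySem.List.pyGetD lst ((lst.length : Int) - 1) (0, 0, 0)) lst σ1).1 j2
            (0, 0, 0) = PT ((primes.take j.toNat).reverse) v) ∧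
        MemoOK primes
          (buildB primes cons piSmall f v (j2 - ((lst.length : Int) - 1)).toNat
            ((lst.length : Int) - 1)
            (PySem.List.pyGetD lst ((lst.length : Int) - 1) (0, 0, 0)) lst σ1).2 := by
      intro lst σ1 hne hlenC hval hσ1
      have hlen1 : 1 ≤ lst.length := List.length_pos_iff.mpr hne
      set jj : Int := (lst.length : Int) - 1 with hjjdef
      have hjj0 : 0 ≤ jj := by omega
      have hjjN : jj.toNat = lst.length - 1 := by omega
      have htv : PySem.List.pyGetD lst jj (0, 0, 0) = PT ((primes.take jj.toNat).reverse) v := by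
        obtain ⟨k, hk⟩ : ∃ k : Nat, jj = (k : Int) := ⟨jj.toNat, by omega⟩
        rw [hk, PySem.List.pyGetD_natCast]
        have hklt : k < lst.length := by omega
        rw [hval k hklt]
        simp
      have hjc : (jj + ((j2 - jj).toNat : Int)) ≤ (countLeN primes (pyIsqrt v) : Nat) := by
        rw [← hCdef]
        rcases le_or_gt j2 jj with hle | hgt
        · simp [show (j2 - jj).toNat = 0 by omega]; omega
        · rw [show ((j2 - jj).toNat : Int) = j2 - jj by omega]; omega
      obtain ⟨hL, hV, hM⟩ := buildB_spec r K primes cons piSmall hP hC v hv hKv IHw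
        (j2 - jj).toNat jj (PySem.List.pyGetD lst jj (0, 0, 0)) lst σ1 f
        (by omega) hjj0 (by omega) hjc hval htv hσ1
      refine ⟨?_, hM⟩
      have hj2lt : j2.toNat < (buildB primes cons piSmall f v (j2 - jj).toNat jj
          (PySem.List.pyGetD lst jj (0, 0, 0)) lst σ1).1.length := by
        rw [hL]
        rcases le_or_gt j2 jj with hle | hgt
        · omega
        · have : (j2 - jj).toNat = j2.toNat - jj.toNat := by omega
          omega
      have hg : PySem.List.pyGetD (buildB primes cons piSmall f v (j2 - jj).toNat jj
          (PySem.List.pyGetD lst jj (0, 0, 0)) lst σ1).1 j2 (0, 0, 0) =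
          PT ((primes.take j2.toNat).reverse) v := by
        obtain ⟨k, hk⟩ : ∃ k : Nat, j2 = (k : Int) := ⟨j2.toNat, by omega⟩
        rw [hk, PySem.List.pyGetD_natCast, ← hk]
        rw [hV k (by rw [show k = j2.toNat by omega]; exact hj2lt)]
        rw [show k = j2.toNat by omega]
      rw [hg]
      -- peel the inadmissible stages: PT take j2 = PT take j
      rcases le_or_gt j C with hle | hgt
      · have : j2 = j := by rw [hj2def, if_neg (by omega)]
        rw [this]
      · have hj2C' : j2 = C := by rw [hj2def, if_pos (by omega)]
        have hpeel := PT_peel primes hP.1 hpos v hv j.toNat (by omega)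
          (by rw [show countLeN primes (pyIsqrt v) = C.toNat by omega]; omega)
        have hCn : C.toNat = countLeN primes (pyIsqrt v) := by omega
        simp only [hpeel, hj2C', hCn]
    -- now dispatch the memo match
    cases hget : PySem.Dict.get? σ v with
    | some lst =>
      simp only [hget]
      obtain ⟨hne, hlenC, hval⟩ := hσ v lst hget
      have := hbranch lst σ hne (by push_cast; rw [hCdef]; push_cast; omega) hval hσ
      rcases hB : buildB primes cons piSmall f v
          (j2 - ((lst.length : Int) - 1)).toNat ((lst.length : Int) - 1)
          (PySem.List.pyGetD lst ((lst.length : Int) - 1) (0, 0, 0)) lst σ with ⟨lst2, σ2⟩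
      rw [hB] at this
      exact this
    | none =>
      simp only [hget]
      have hseed : [(v - 1, PySem.Int.floordiv (v * (v + 1)) 2 - 1,
          PySem.Int.floordiv (v * (v + 1)) 2 - 1)] =
          [PT ([] : List Int) v] := by
        rw [PySem.Int.floordiv_eq_ediv_of_pos (by omega : (0:Int) < 2)]
        rfl
      have hσ1 : MemoOK primes (PySem.Dict.insert σ v
          [(v - 1, PySem.Int.floordiv (v * (v + 1)) 2 - 1,
            PySem.Int.floordiv (v * (v + 1)) 2 - 1)]) := by
        intro w lstw hw
        rw [PySem.Dict.get?_insert] at hw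
        by_cases hwv : w = v
        · subst hwv
          rw [if_pos rfl] at hw
          injection hw with hw
          rw [← hw]
          refine ⟨by simp, by simp, ?_⟩
          intro i hi
          simp only [List.length_cons, List.length_nil] at hi
          have : i = 0 := by omega
          subst this
          rw [hseed]
          rfl
        · rw [if_neg hwv] at hw
          exact hσ w lstw hw
      have hval : ∀ i : Nat, i < ([(v - 1, PySem.Int.floordiv (v * (v + 1)) 2 - 1,
          PySem.Int.floordiv (v * (v + 1)) 2 - 1)] :
            List (Int × Int × Int)).length →
          ([(v - 1, PySem.Int.floordiv (v * (v + 1)) 2 - 1,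
            PySem.Int.floordiv (v * (v + 1)) 2 - 1)] :
            List (Int × Int × Int)).getD i (0, 0, 0) = PT ((primes.take i).reverse) v := by
        intro i hi
        simp only [List.length_cons, List.length_nil] at hi
        have : i = 0 := by omega
        subst this
        rw [hseed]
        rfl
      have := hbranch _ _ (by simp) (by simp; omega) hval hσ1
      rcases hB : buildB primes cons piSmall f v
          (j2 - ((([(v - 1, PySem.Int.floordiv (v * (v + 1)) 2 - 1,
              PySem.Int.floordiv (v * (v + 1)) 2 - 1)] :
            List (Int × Int × Int)).length : Int) - 1)).toNat _ _ _ _ with ⟨lst2, σ2⟩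
      rw [hB] at this
      exact this



-- ---------- B's discovery loop maintains the invariants ----------

def initDSt (r : Int) : DSt :=
  ⟨[], [], List.replicate (r + 2).toNat (0 : Int), PySem.Dict.empty, 0⟩

def DInv (r K : Int) (st : DSt) : Prop :=
  st.primes.reverse = discList K ∧
  st.cnt = (st.primes.length : Int) ∧
  PrimesOK st.primes K ∧
  ConsOK st.primes st.cons ∧
  PiOK r K st.primes st.piSmall ∧
  MemoOK st.primes st.memo

theorem discList_succ (K : Int) (hK : 2 ≤ K) :
    discList K = discStep (discList (K - 1)) K := by
  have hsplit : PySem.List.pyRange 2 (K + 1) 1 = PySem.List.pyRange 2 K 1 ++ [K] := by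
    have := PySem.List.pyRange_one_succ_right (a := 2) (b := K) (by omega)
    simpa using this
  have h1 : discList (K - 1) = List.foldl discStep [] (PySem.List.pyRange 2 K 1) := by
    rw [discList, show K - 1 + 1 = K by omega]
  rw [discList, hsplit, List.foldl_append, h1]
  rfl

theorem pyGetD_replicate (m : Nat) (x : Int) (hx : 0 ≤ x) :
    PySem.List.pyGetD (List.replicate m (0 : Int)) x 0 = 0 := by
  obtain ⟨k, rfl⟩ : ∃ k : Nat, x = (k : Int) := ⟨x.toNat, by omega⟩
  rw [PySem.List.pyGetD_natCast]
  rcases Nat.lt_or_ge k m with h | h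
  · rw [List.getD_eq_getElem _ _ (by simpa using h)]
    simp
  · rw [List.getD_eq_default _ _ (by simpa using h)]

theorem countLeN_snoc (ps : List Int) (k x : Int) :
    countLeN (ps ++ [k]) x = countLeN ps x + (if k ≤ x then 1 else 0) := by
  rw [countLeN_append]
  have h1 : countLeN [k] x = if k ≤ x then 1 else 0 := by
    by_cases h : k ≤ x <;> simp [countLeN, h]
  rw [h1]

theorem isqrt_le_self (v : Int) (hv : 0 ≤ v) : pyIsqrt v ≤ v := by
  simp only [pyIsqrt]
  have := Nat.sqrt_le_self v.toNat
  omega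

theorem disc_step (n r K : Int) (hrn : r ≤ n) (hn : 1 ≤ n) (hK2 : 2 ≤ K) (hKr : K ≤ r)
    (st : DSt) (h : DInv r (K - 1) st) :
    DInv r K (discBStep (n.toNat + 2) st K) := by
  obtain ⟨hrev, hcnt, hP, hC, hpi, hM⟩ := h
  have hKn : K.toNat < n.toNat + 2 := by omega
  have hcnt0 : 0 ≤ st.cnt := by rw [hcnt]; positivity
  have hcntlen : st.cnt ≤ (st.primes.length : Int) := by rw [hcnt]
  have htakeL : st.primes.take st.cnt.toNat = st.primes := by
    rw [show st.cnt.toNat = st.primes.length by omega]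
    exact List.take_length
  -- the three trip results
  have hspec1 := tripB_spec r (K - 1) st.primes st.cons st.piSmall hP hC hpi
    (K.toNat + 1) K (by omega) (by omega) (isqrt_le_sub_one K hK2)
    (n.toNat + 2) st.cnt st.memo (by omega) hcnt0 hcntlen hM
  rcases hE1 : tripB st.primes st.cons st.piSmall (n.toNat + 2) K st.cnt st.memo with ⟨t1, σ1⟩
  rw [hE1] at hspec1
  obtain ⟨ht1, hσ1⟩ := hspec1
  dsimp only at ht1 hσ1
  rw [htakeL, hrev] at ht1
  have hspec2 := tripB_spec r (K - 1) st.primes st.cons st.piSmall hP hC hpi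
    (K.toNat + 1) (K - 1) (by omega) (by omega)
    (le_trans (isqrt_le_self (K - 1) (by omega)) (by omega))
    (n.toNat + 2) st.cnt σ1 (by omega) hcnt0 hcntlen hσ1
  rcases hE2 : tripB st.primes st.cons st.piSmall (n.toNat + 2) (K - 1) st.cnt σ1 with ⟨t2, σ2⟩
  rw [hE2] at hspec2
  obtain ⟨ht2, hσ2⟩ := hspec2
  dsimp only at ht2 hσ2
  rw [htakeL, hrev] at ht2
  have hspec3 := tripB_spec r (K - 1) st.primes st.cons st.piSmall hP hC hpi
    (K.toNat + 1) (K - 1) (by omega) (by omega)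
    (le_trans (isqrt_le_self (K - 1) (by omega)) (by omega))
    (n.toNat + 2) st.cnt σ2 (by omega) hcnt0 hcntlen hσ2
  rcases hE3 : tripB st.primes st.cons st.piSmall (n.toNat + 2) (K - 1) st.cnt σ2 with ⟨t3, σ3⟩
  rw [hE3] at hspec3
  obtain ⟨ht3, hσ3⟩ := hspec3
  dsimp only at ht3 hσ3
  rw [htakeL, hrev] at ht3
  have hpilen : ((st.piSmall.length : Int)) = r + 2 := by
    rw [hpi.1]; omega
  have hKlt : K < (st.piSmall.length : Int) := by omega
  have hcall : countLeN st.primes K = st.primes.length :=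
    countLeN_all st.primes K (fun p hp => by have := (hP.2 p hp).2; omega)
  simp only [discBStep, hE1, hE2, hE3]
  by_cases hg : t1.1 > t2.1
  · rw [if_pos hg]
    have hdisc : discStep (discList (K - 1)) K = K :: discList (K - 1) := by
      rw [discStep, if_pos (by rw [← ht1, ← ht2]; exact hg)]
    refine ⟨?_, ?_, ?_, ?_, ?_, ?_⟩
    · show (st.primes ++ [K]).reverse = discList K
      rw [discList_succ K hK2, hdisc, ← hrev]
      simp
    · show st.cnt + 1 = ((st.primes ++ [K]).length : Int)
      simp only [List.length_append, List.length_cons, List.length_nil]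
      push_cast
      omega
    · show PrimesOK (st.primes ++ [K]) K
      constructor
      · rw [List.pairwise_append]
        exact ⟨hP.1, List.pairwise_singleton _ _,
          fun a ha b hb => by
            simp only [List.mem_singleton] at hb
            subst hb
            have := (hP.2 a ha).2
            omega⟩
      · intro p hp
        rcases List.mem_append.mp hp with h' | h'
        · have := hP.2 p h'; omega
        · simp only [List.mem_singleton] at h'; omega
    · show ConsOK (st.primes ++ [K]) (st.cons ++ [(t3.1, t3.2.1)])
      constructor
      · simp only [List.length_append, List.length_cons, List.length_nil, hC.1]
      · intro i hi
        simp only [List.length_append, List.length_cons, List.length_nil] at hi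
        rcases Nat.lt_or_ge i st.primes.length with hilt | hige
        · rw [getD_snoc_lt st.cons _ i _ (by rw [hC.1]; exact hilt),
            getD_snoc_lt st.primes _ i _ hilt,
            List.take_append_of_le_length (le_of_lt hilt)]
          exact hC.2 i hilt
        · have hieq : i = st.primes.length := by omega
          subst hieq
          rw [show st.primes.length = st.cons.length from hC.1.symm, getD_snoc_eq,
            show st.cons.length = st.primes.length from hC.1, getD_snoc_eq,
            List.take_left]
          rw [ht3, hrev]
    · show PiOK r K (st.primes ++ [K]) (PySem.List.pySetD st.piSmall K (st.cnt + 1))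
      constructor
      · rw [PySem.List.length_pySetD, hpi.1]
      · intro x hx0 hxK
        rw [getSet st.piSmall K (st.cnt + 1) x (by omega) hKlt hx0, countLeN_snoc]
        by_cases hxKe : x = K
        · subst hxKe
          rw [if_pos rfl, hcall, if_pos (le_refl x)]
          push_cast
          omega
        · rw [if_neg hxKe, hpi.2 x hx0 (by omega), if_neg (by omega)]
          push_cast
          omega
    · intro v lst hv
      obtain ⟨hne, hlen, hval⟩ := hσ3 v lst hv
      have hmono : countLeN st.primes (pyIsqrt v) ≤
          countLeN (st.primes ++ [K]) (pyIsqrt v) := by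
        rw [countLeN_snoc]
        split <;> omega
      refine ⟨hne, ?_, ?_⟩
      · show lst.length ≤ countLeN (st.primes ++ [K]) (pyIsqrt v) + 1
        omega
      · intro i hi
        show lst.getD i (0, 0, 0) = PT (((st.primes ++ [K]).take i).reverse) v
        have hile : i ≤ st.primes.length := by
          have := countLeN_le_length st.primes (pyIsqrt v)
          omega
        rw [List.take_append_of_le_length hile]
        exact hval i hi
  · rw [if_neg hg]
    have hdisc : discStep (discList (K - 1)) K = discList (K - 1) := by
      rw [discStep, if_neg (by rw [← ht1, ← ht2]; exact hg)]
    refine ⟨?_, hcnt, ?_, hC, ?_, hσ2⟩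
    · show st.primes.reverse = discList K
      rw [discList_succ K hK2, hdisc, hrev]
    · exact ⟨hP.1, fun p hp => ⟨(hP.2 p hp).1, by have := (hP.2 p hp).2; omega⟩⟩
    · show PiOK r K st.primes (PySem.List.pySetD st.piSmall K st.cnt)
      constructor
      · rw [PySem.List.length_pySetD, hpi.1]
      · intro x hx0 hxK
        rw [getSet st.piSmall K st.cnt x (by omega) hKlt hx0]
        by_cases hxKe : x = K
        · subst hxKe
          rw [if_pos rfl, hcall]
          exact hcnt
        · rw [if_neg hxKe]
          exact hpi.2 x hx0 (by omega)

theorem disc_fold (n r : Int) (hrn : r ≤ n) (hn : 1 ≤ n) :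
    ∀ (M : Nat) (K : Int), K - 1 = (M : Int) → 1 ≤ K → K ≤ r →
      DInv r K ((PySem.List.pyRange 2 (K + 1) 1).foldl (discBStep (n.toNat + 2)) (initDSt r)) := by
  intro M
  induction M with
  | zero =>
    intro K hM h1 hKr
    have hK1 : K = 1 := by omega
    subst hK1
    rw [show (1 : Int) + 1 = 2 by rfl, PySem.List.pyRange_one_eq_nil (by omega)]
    simp only [List.foldl_nil]
    refine ⟨?_, ?_, ?_, ?_, ?_, ?_⟩
    · rw [discList, PySem.List.pyRange_one_eq_nil (by omega)]
      rfl
    · rfl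
    · exact ⟨List.Pairwise.nil, fun p hp => absurd hp (List.not_mem_nil)⟩
    · exact ⟨rfl, fun i hi => absurd hi (by simp [initDSt])⟩
    · refine ⟨by simp [initDSt], ?_⟩
      intro x hx0 hxK
      simp only [initDSt]
      rw [pyGetD_replicate _ x hx0]
      rfl
    · intro v lst hv
      rw [show (initDSt r).memo = PySem.Dict.empty by rfl, PySem.Dict.get?_empty] at hv
      exact absurd hv (by simp)
  | succ M ihM =>
    intro K hM h1 hKr
    have hK2 : 2 ≤ K := by omega
    have hsplit : PySem.List.pyRange 2 (K + 1) 1 = PySem.List.pyRange 2 K 1 ++ [K] := by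
      have := PySem.List.pyRange_one_succ_right (a := 2) (b := K) (by omega)
      simpa using this
    rw [hsplit, List.foldl_append]
    simp only [List.foldl_cons, List.foldl_nil]
    have hprev := ihM (K - 1) (by omega) (by omega) (by omega)
    rw [show K - 1 + 1 = K by omega] at hprev
    exact disc_step n r K hrn hn hK2 hKr _ hprev

theorem B_char (n : Int) (hn : 1 ≤ n) :
    sievecntsum_alt n = PySem.Int.mod ((PT (discList (pyIsqrt n)) n).2.2) MOD := by
  obtain ⟨r, hrdef⟩ : ∃ r, pyIsqrt n = r := ⟨_, rfl⟩
  have hs : SqrtOK n r := hrdef ▸ sqrtOK_pyIsqrt n hn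
  obtain ⟨-, hr1, hrr, hrn⟩ := hs
  have hrlen : r ≤ n := by nlinarith
  simp only [sievecntsum_alt]
  rw [hrdef]
  rw [show (⟨[], [], List.replicate (r + 2).toNat (0 : Int), PySem.Dict.empty, 0⟩ : DSt) =
    initDSt r from rfl]
  have hD := disc_fold n r hrlen hn (r - 1).toNat r (by omega) hr1 (le_refl r)
  set st := (PySem.List.pyRange 2 (r + 1) 1).foldl (discBStep (n.toNat + 2)) (initDSt r) with hstdef
  obtain ⟨hrev, hcnt, hP, hC, hpi, hM⟩ := hD
  have hspec := tripB_spec r r st.primes st.cons st.piSmall hP hC hpi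
    (n.toNat + 1) n (by omega) (by omega) (by rw [hrdef])
    (n.toNat + 2) st.cnt st.memo (by omega) (by rw [hcnt]; positivity) (by rw [hcnt]) hM
  rcases hE : tripB st.primes st.cons st.piSmall (n.toNat + 2) n st.cnt st.memo with ⟨t, σ⟩
  rw [hE] at hspec
  obtain ⟨ht, -⟩ := hspec
  dsimp only at ht
  have htakeL : st.primes.take st.cnt.toNat = st.primes := by
    rw [show st.cnt.toNat = st.primes.length by omega]
    exact List.take_length
  rw [htakeL, hrev] at ht
  simp only [hE]
  rw [ht]

-- ===== VERDICT (by name: the statement is the Claim_ definition above) =====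
theorem sievecntsum_spec : Claim_equal_sievecntsum := by
  intro n _ hpre
  unfold Spec_sievecntsum
  rw [A_char n hpre, B_char n hpre]
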